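-- pv_equiv track=rewrite | github.com/PPL-Group4/AutomaticRAB | cost_weight/services/excel_parser.py | _find_column_matches
-- ===== SOURCE A (Python) =====
-- from typing import Optional, List, Dict, Any, Tuple
--
-- def _find_column_matches(df_columns: List[str]) -> Tuple[Optional[str], Optional[str], Optional[str], Optional[str]]:
--     """Find matching columns for name, quantity, price, and total"""
--     name_cols = ['item', 'description', 'pekerjaan', 'uraian', 'nama']
--     qty_cols = ['quantity', 'qty', 'volume', 'kuantitas', 'jumlah']
--     price_cols = ['unit price', 'unit_price', 'harga satuan', 'harga', 'price']
--     total_cols = ['total', 'total price', 'total_price', 'jumlah harga']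
--
--     name_col = None
--     qty_col = None
--     price_col = None
--     total_col = None
--
--     for col in df_columns:
--         if not name_col and any(nc in col for nc in name_cols):
--             name_col = col
--         if not qty_col and any(qc in col for qc in qty_cols):
--             qty_col = col
--         if not price_col and any(pc in col for pc in price_cols):
--             price_col = col
--         if not total_col and any(tc in col for tc in total_cols):
--             total_col = col
--
--     return name_col, qty_col, price_col, total_col
-- ===== SOURCE B (Python) =====
-- from typing import Optional, List, Tuple
--
-- def _find_column_matches(df_columns: List[str]) -> Tuple[Optional[str], Optional[str], Optional[str], Optional[str]]:
--     """Find matching columns for name, quantity, price, and total"""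
--     def first(keywords):
--         return next((col for col in df_columns if any(k in col for k in keywords)), None)
--
--     return (first(['item', 'description', 'pekerjaan', 'uraian', 'nama']),
--             first(['quantity', 'qty', 'volume', 'kuantitas', 'jumlah']),
--             first(['unit price', 'unit_price', 'harga satuan', 'harga', 'price']),
--             first(['total', 'total price', 'total_price', 'jumlah harga']))
-- ===== Notes on version B (the rewrite author's own statement) =====
-- stated objective: idiomatic
-- what changed: Replaces A's single shared loop mutating four guarded slots with four independent first-match searches (next over a generator per keyword list), returning the tuple directly.
import Mathlib
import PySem

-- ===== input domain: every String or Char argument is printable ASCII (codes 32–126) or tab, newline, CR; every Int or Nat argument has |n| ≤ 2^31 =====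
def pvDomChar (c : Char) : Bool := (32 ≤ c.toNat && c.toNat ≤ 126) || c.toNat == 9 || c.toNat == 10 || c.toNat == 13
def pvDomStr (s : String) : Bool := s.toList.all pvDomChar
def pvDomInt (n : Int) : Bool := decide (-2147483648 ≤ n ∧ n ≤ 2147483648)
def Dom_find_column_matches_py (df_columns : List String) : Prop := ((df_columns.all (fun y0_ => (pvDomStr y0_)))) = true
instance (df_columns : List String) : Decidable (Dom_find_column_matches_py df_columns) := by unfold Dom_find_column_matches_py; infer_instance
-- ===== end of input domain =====

-- B replaces A's single shared loop with four independent first-match searches (simpler decomposition, same results).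

-- ===== PORT A =====
-- shared keyword lists (identical, same order, in both programs)
def nameKws : List String := ["item", "description", "pekerjaan", "uraian", "nama"]
def qtyKws : List String := ["quantity", "qty", "volume", "kuantitas", "jumlah"]
def priceKws : List String := ["unit price", "unit_price", "harga satuan", "harga", "price"]
def totalKws : List String := ["total", "total price", "total_price", "jumlah harga"]

-- any(kw in col for kw in kws)
def anyKwIn (kws : List String) (col : String) : Bool :=
  kws.any (fun kw => PySem.Str.isIn kw col)

-- Python truthiness of an Optional[str]: 'not target' is true for None and for ""
def pyNot (o : Option String) : Bool :=
  match o with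
  | none => true
  | some s => s == ""

-- one iteration of A's loop body: the four guarded assignments, in order
def stepA (st : Option String × Option String × Option String × Option String) (col : String) :
    Option String × Option String × Option String × Option String :=
  let st := if pyNot st.1 && anyKwIn nameKws col then (some col, st.2) else st
  let st := if pyNot st.2.1 && anyKwIn qtyKws col then (st.1, some col, st.2.2) else st
  let st := if pyNot st.2.2.1 && anyKwIn priceKws col then (st.1, st.2.1, some col, st.2.2.2) else st
  let st := if pyNot st.2.2.2 && anyKwIn totalKws col then (st.1, st.2.1, st.2.2.1, some col) else st
  st

def find_column_matches_py (df_columns : List String) : Option String × Option String × Option String × Option String :=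
  df_columns.foldl stepA (none, none, none, none)

-- ===== PORT B =====
-- next((col for col in df_columns if any(k in col for k in keywords)), None)
def firstMatch (df_columns : List String) (kws : List String) : Option String :=
  df_columns.find? (fun col => anyKwIn kws col)

def find_column_matches_py_alt (df_columns : List String) : Option String × Option String × Option String × Option String :=
  (firstMatch df_columns nameKws, firstMatch df_columns qtyKws,
   firstMatch df_columns priceKws, firstMatch df_columns totalKws)

-- ===== PRECONDITION & SPEC =====
def Spec_find_column_matches_py (df_columns : List String) (out : Option String × Option String × Option String × Option String) : Prop := out = find_column_matches_py_alt df_columns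
instance (df_columns : List String) (out : Option String × Option String × Option String × Option String) : Decidable (Spec_find_column_matches_py df_columns out) := by unfold Spec_find_column_matches_py; infer_instance

-- ===== CLAIM (what is proved, stated in full; the proofs are below) =====
def Claim_equal_find_column_matches_py : Prop := ∀ (df_columns : List String), Dom_find_column_matches_py df_columns → Spec_find_column_matches_py df_columns (find_column_matches_py df_columns)

-- ===== LEMMAS AND PROOFS =====

-- an option that is not 'some ""' is truthy iff it is some
theorem pyNot_of_ne (o : Option String) (h : o ≠ some "") : pyNot o = o.isNone := by
  cases o with
  | none => rfl
  | some s =>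
    simp [pyNot, Option.isNone]
    intro hs; exact h (by simp [hs])

-- the empty string matches no keyword of any of the four lists
theorem anyKwIn_empty_name : anyKwIn nameKws "" = false := by decide
theorem anyKwIn_empty_qty : anyKwIn qtyKws "" = false := by decide
theorem anyKwIn_empty_price : anyKwIn priceKws "" = false := by decide
theorem anyKwIn_empty_total : anyKwIn totalKws "" = false := by decide

-- the fold over the 4-tuple is componentwise: each component is A's one-slot loop
def step1 (kws : List String) (o : Option String) (col : String) : Option String :=
  if pyNot o && anyKwIn kws col then some col else o

theorem stepA_split (st : Option String × Option String × Option String × Option String) (col : String) :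
    stepA st col = (step1 nameKws st.1 col, step1 qtyKws st.2.1 col,
                    step1 priceKws st.2.2.1 col, step1 totalKws st.2.2.2 col) := by
  obtain ⟨a, b, c, d⟩ := st
  simp only [stepA, step1]
  split_ifs <;> rfl

theorem foldA_split (xs : List String) (st : Option String × Option String × Option String × Option String) :
    xs.foldl stepA st = (xs.foldl (step1 nameKws) st.1, xs.foldl (step1 qtyKws) st.2.1,
                         xs.foldl (step1 priceKws) st.2.2.1, xs.foldl (step1 totalKws) st.2.2.2) := by
  induction xs generalizing st with
  | nil => rfl
  | cons x xs ih => simp only [List.foldl_cons, ih, stepA_split]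

-- A's one-slot loop computes 'keep the old truthy value, else first match'
theorem fold1_eq (kws : List String) (hk : anyKwIn kws "" = false) :
    ∀ (xs : List String) (o : Option String), o ≠ some "" →
      xs.foldl (step1 kws) o = (o.or (xs.find? (fun col => anyKwIn kws col))) := by
  intro xs
  induction xs with
  | nil => intro o _; cases o <;> rfl
  | cons x xs ih =>
    intro o ho
    simp only [List.foldl_cons, List.find?_cons]
    cases o with
    | some s =>
      have : step1 kws (some s) x = some s := by
        simp [step1, pyNot_of_ne _ ho, Option.isNone]
      rw [this, ih _ ho]
      cases h : anyKwIn kws x <;> simp [Option.or]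
    | none =>
      cases h : anyKwIn kws x with
      | false =>
        have : step1 kws none x = none := by simp [step1, pyNot, h]
        rw [this, ih _ (by simp)]
      | true =>
        have hx : x ≠ "" := by intro e; rw [e] at h; rw [hk] at h; exact absurd h (by simp)
        have : step1 kws none x = some x := by simp [step1, pyNot, h]
        rw [this, ih _ (by simp [hx])]
        simp [Option.or]

-- ===== VERDICT (by name: the statement is the Claim_ definition above) =====
theorem find_column_matches_py_spec : Claim_equal_find_column_matches_py := by
  intro df _
  unfold Spec_find_column_matches_py
  unfold find_column_matches_py find_column_matches_py_alt firstMatch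
  rw [foldA_split]
  rw [fold1_eq nameKws anyKwIn_empty_name df none (by simp),
      fold1_eq qtyKws anyKwIn_empty_qty df none (by simp),
      fold1_eq priceKws anyKwIn_empty_price df none (by simp),
      fold1_eq totalKws anyKwIn_empty_total df none (by simp)]
  rfl
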